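-- pv_equiv track=rewrite | github.com/Ar0729/RemediAI-Intelligent-Homeopathic-Care | new.py | find_matches_bow
-- ===== SOURCE A (Python) =====
-- def find_matches_bow(extracted_phrases, dataset_symptoms, threshold=1):
--     matched_indices = set()
--     for phrase in extracted_phrases:
--         phrase_words = set(phrase.split())
--         for i, symptom in enumerate(dataset_symptoms):
--             symptom_words = set(symptom.split())
--             if len(phrase_words.intersection(symptom_words)) >= threshold:
--                 matched_indices.add(i)
--     return matched_indices
-- ===== SOURCE B (Python) =====
-- def find_matches_bow(extracted_phrases, dataset_symptoms, threshold=1):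
--     # Build an inverted word -> symptom-indices index once, then score each
--     # phrase by counting, per symptom index, how many phrase words hit it.
--     inverted = {}
--     for i, symptom in enumerate(dataset_symptoms):
--         for w in set(symptom.split()):
--             inverted.setdefault(w, []).append(i)
--     matched = set()
--     for phrase in extracted_phrases:
--         counts = [0] * len(dataset_symptoms)
--         for w in set(phrase.split()):
--             for i in inverted.get(w, []):
--                 counts[i] += 1
--         for i, c in enumerate(counts):
--             if c >= threshold:
--                 matched.add(i)
--     return matched
-- ===== Notes on version B (the rewrite author's own statement) =====
-- stated objective: faster
-- what changed: A re-splits every symptom and intersects word sets for every (phrase, symptom) pair; B builds an inverted word-to-indices index over the dataset once, then scores each phrase with a per-index hit-count array and keeps the indices reaching the threshold.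
import Mathlib
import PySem

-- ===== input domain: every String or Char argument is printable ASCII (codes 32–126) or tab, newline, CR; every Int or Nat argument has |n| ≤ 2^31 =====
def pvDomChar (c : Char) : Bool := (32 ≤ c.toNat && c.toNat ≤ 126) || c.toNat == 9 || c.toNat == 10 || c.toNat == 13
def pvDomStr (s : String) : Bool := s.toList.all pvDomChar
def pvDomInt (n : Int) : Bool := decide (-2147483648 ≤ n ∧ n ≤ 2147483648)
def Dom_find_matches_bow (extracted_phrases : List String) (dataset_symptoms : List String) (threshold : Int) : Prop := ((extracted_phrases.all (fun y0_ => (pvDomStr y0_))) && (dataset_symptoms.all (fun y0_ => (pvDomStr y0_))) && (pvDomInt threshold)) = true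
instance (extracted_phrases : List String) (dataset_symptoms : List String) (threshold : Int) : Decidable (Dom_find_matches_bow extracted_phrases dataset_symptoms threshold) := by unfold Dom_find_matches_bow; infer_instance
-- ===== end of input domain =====

-- B replaces A's per-phrase rescan and re-split of every symptom by an inverted word→indices
-- index built once plus a per-phrase hit-count array (objective: faster). Both Pythons return
-- a set; the ports return its element list and the two ports' lists are proved equal.

-- ===== PORT A =====
def find_matches_bow (extracted_phrases : List String) (dataset_symptoms : List String) (threshold : Int) : List Int :=
  extracted_phrases.foldl (fun matched_indices phrase =>
    let phrase_words : PySem.Set String := PySem.Set.ofList (PySem.Str.split₀ phrase)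
    (PySem.List.enumerate dataset_symptoms).foldl (fun matched_indices p =>
      let symptom_words : PySem.Set String := PySem.Set.ofList (PySem.Str.split₀ p.2)
      if threshold ≤ PySem.Set.len (PySem.Set.inter phrase_words symptom_words)
      then PySem.Set.add matched_indices p.1 else matched_indices) matched_indices)
    PySem.Set.empty

-- ===== PORT B =====
-- inverted = {}; for i, symptom: for w in set(symptom.split()): inverted.setdefault(w, []).append(i)
-- (setdefault(w, []).append(i) = modify w [] (· ++ [i]): exact for an in-place list append)
def pvInverted (dataset_symptoms : List String) : PySem.Dict String (List Int) :=
  (PySem.List.enumerate dataset_symptoms).foldl (fun inv p =>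
    (PySem.Set.ofList (PySem.Str.split₀ p.2)).foldl
      (fun inv w => inv.modify w [] (fun l => l ++ [p.1])) inv) PySem.Dict.empty

-- counts = [0]*len(ds); for w in set(phrase.split()): for i in inverted.get(w, []): counts[i] += 1
-- (pySetD/pyGetD are exact here: every index stored in inverted satisfies 0 ≤ i < len(ds))
def pvCounts (inv : PySem.Dict String (List Int)) (n : Int) (phrase : String) : List Int :=
  (PySem.Set.ofList (PySem.Str.split₀ phrase)).foldl (fun c w =>
    (inv.getD w []).foldl
      (fun c i => PySem.List.pySetD c i (PySem.List.pyGetD c i 0 + 1)) c)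
    (PySem.List.pyRepeat [0] n)

def find_matches_bow_alt (extracted_phrases : List String) (dataset_symptoms : List String) (threshold : Int) : List Int :=
  let inv := pvInverted dataset_symptoms
  extracted_phrases.foldl (fun matched phrase =>
    let counts := pvCounts inv (PySem.List.len dataset_symptoms) phrase
    (PySem.List.enumerate counts).foldl
      (fun matched p => if threshold ≤ p.2 then PySem.Set.add matched p.1 else matched)
      matched) PySem.Set.empty

-- ===== PRECONDITION & SPEC =====
def Spec_find_matches_bow (extracted_phrases : List String) (dataset_symptoms : List String) (threshold : Int) (out : List Int) : Prop := out = find_matches_bow_alt extracted_phrases dataset_symptoms threshold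
instance (extracted_phrases : List String) (dataset_symptoms : List String) (threshold : Int) (out : List Int) : Decidable (Spec_find_matches_bow extracted_phrases dataset_symptoms threshold out) := by unfold Spec_find_matches_bow; infer_instance

-- ===== CLAIM (what is proved, stated in full; the proofs are below) =====
def Claim_equal_find_matches_bow : Prop := ∀ (extracted_phrases : List String) (dataset_symptoms : List String) (threshold : Int), Dom_find_matches_bow extracted_phrases dataset_symptoms threshold → Spec_find_matches_bow extracted_phrases dataset_symptoms threshold (find_matches_bow extracted_phrases dataset_symptoms threshold)

-- ===== LEMMAS AND PROOFS =====

-- B's per-phrase flat hit list (each index occurs once per shared distinct word)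
def pvHits (inv : PySem.Dict String (List Int)) (phrase : String) : List Int :=
  (PySem.Set.ofList (PySem.Str.split₀ phrase)).flatMap (fun w => inv.getD w [])

-- A's inner loop is a Set.update with the filtered index list
theorem pv_innerA (t : Int) (pw : PySem.Set String) (l : List (Int × String)) (s : PySem.Set Int) :
    l.foldl (fun m p =>
        if t ≤ PySem.Set.len (PySem.Set.inter pw (PySem.Set.ofList (PySem.Str.split₀ p.2)))
        then PySem.Set.add m p.1 else m) s
      = PySem.Set.update s ((l.filter (fun p =>
          decide (t ≤ PySem.Set.len (PySem.Set.inter pw (PySem.Set.ofList (PySem.Str.split₀ p.2)))))).map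
            (fun p => p.1)) := by
  induction l generalizing s with
  | nil => rfl
  | cons x xs ih =>
    rw [List.foldl_cons, List.filter_cons]
    by_cases h : t ≤ PySem.Set.len (PySem.Set.inter pw (PySem.Set.ofList (PySem.Str.split₀ x.2)))
    · rw [if_pos h, ih, if_pos (by simpa using h)]; rfl
    · rw [if_neg h, ih, if_neg (by simpa using h)]

-- B's inner loop is a Set.update with the filtered index list
theorem pv_innerB (t : Int) (l : List (Int × Int)) (s : PySem.Set Int) :
    l.foldl (fun m p => if t ≤ p.2 then PySem.Set.add m p.1 else m) s
      = PySem.Set.update s ((l.filter (fun p => decide (t ≤ p.2))).map (fun p => p.1)) := by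
  induction l generalizing s with
  | nil => rfl
  | cons x xs ih =>
    rw [List.foldl_cons, List.filter_cons]
    by_cases h : t ≤ x.2
    · rw [if_pos h, ih, if_pos (by simpa using h)]; rfl
    · rw [if_neg h, ih, if_neg (by simpa using h)]

-- one symptom's contribution to the inverted index
theorem pv_inner_modify (i : Int) (ws : List String) (w : String) (inv : PySem.Dict String (List Int)) :
    ((PySem.Set.ofList ws).foldl (fun inv w' => inv.modify w' [] (fun l => l ++ [i])) inv).getD w []
      = inv.getD w [] ++ (if w ∈ ws then [i] else []) := by
  have h1 : (PySem.Set.ofList ws).foldl (fun inv w' => inv.modify w' [] (fun l => l ++ [i])) inv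
      = ((PySem.Set.ofList ws).map (fun w' : String => (w', i))).foldl (fun d p => d.modify p.1 [] (fun l => l ++ [p.2])) inv := by
    rw [List.foldl_map]
  rw [h1, PySem.Dict.getD_foldl_modify_append, List.filter_map]
  have h2 : ((fun p => p.1 == w) ∘ (fun w' : String => (w', i))) = (fun w' => w' == w) := rfl
  rw [h2, List.filter_beq]
  by_cases hm : w ∈ ws
  · have hc : List.count w (PySem.Set.ofList ws) = 1 :=
      List.count_eq_one_of_mem (PySem.Set.nodup_ofList ws) ((PySem.Set.mem_ofList ws w).mpr hm)
    simp [hm]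
  · have hc : List.count w (PySem.Set.ofList ws) = 0 :=
      List.count_eq_zero.mpr (fun hcmem => hm ((PySem.Set.mem_ofList ws w).mp hcmem))
    simp [hm, hc]

theorem pv_inverted_getD_gen (w : String) (ds : List String) : ∀ (s : Int) (inv : PySem.Dict String (List Int)),
    ((PySem.List.enumerate ds s).foldl (fun inv p =>
        (PySem.Set.ofList (PySem.Str.split₀ p.2)).foldl
          (fun inv w' => inv.modify w' [] (fun l => l ++ [p.1])) inv) inv).getD w []
      = inv.getD w [] ++ ((PySem.List.enumerate ds s).filter
          (fun p => decide (w ∈ PySem.Str.split₀ p.2))).map (fun p => p.1) := by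
  induction ds with
  | nil => intro s inv; simp [PySem.List.enumerate]
  | cons d ds ih =>
    intro s inv
    rw [PySem.List.enumerate_cons, List.foldl_cons, ih, pv_inner_modify, List.filter_cons]
    by_cases hm : w ∈ PySem.Str.split₀ d
    · simp [hm]
    · simp [hm]

-- the inverted index maps a word to the list of indices of symptoms containing it
theorem pv_inverted_getD (dataset_symptoms : List String) (w : String) :
    (pvInverted dataset_symptoms).getD w []
      = ((PySem.List.enumerate dataset_symptoms).filter
          (fun p => decide (w ∈ PySem.Str.split₀ p.2))).map (fun p => p.1) := by
  unfold pvInverted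
  rw [pv_inverted_getD_gen, PySem.Dict.getD_empty, List.nil_append]

theorem pv_inverted_nodup (ds : List String) (w : String) : ((pvInverted ds).getD w []).Nodup := by
  rw [pv_inverted_getD]
  have h2 := (PySem.List.pairwise_lt_enumerate ds 0).filter (fun p => decide (w ∈ PySem.Str.split₀ p.2))
  have h3 : (((PySem.List.enumerate ds 0).filter
      (fun p => decide (w ∈ PySem.Str.split₀ p.2))).map (fun p => p.1)).Pairwise (· < ·) := by
    rw [List.pairwise_map]; exact h2
  exact h3.imp (fun hlt => ne_of_lt hlt)

theorem pv_mem_inverted (ds : List String) (w : String) (k : Nat) (hk : k < ds.length) :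
    ((k : Int) ∈ (pvInverted ds).getD w []) ↔ w ∈ PySem.Str.split₀ ds[k] := by
  rw [pv_inverted_getD]
  simp only [List.mem_map, List.mem_filter, PySem.List.mem_enumerate_iff]
  constructor
  · rintro ⟨p, ⟨⟨j, hj, rfl⟩, hq⟩, hp1⟩
    simp only [zero_add] at hp1
    have hjk : j = k := by exact_mod_cast hp1
    subst hjk
    simpa using hq
  · intro hw
    exact ⟨((k : Int), ds[k]), ⟨⟨k, hk, by simp⟩, by simpa using hw⟩, rfl⟩

theorem pv_mem_inverted_range (ds : List String) (w : String) (i : Int)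
    (h : i ∈ (pvInverted ds).getD w []) : ∃ k : Nat, k < ds.length ∧ i = (k : Int) := by
  rw [pv_inverted_getD] at h
  simp only [List.mem_map, List.mem_filter, PySem.List.mem_enumerate_iff] at h
  obtain ⟨p, ⟨⟨k, hk, hp⟩, -⟩, rfl⟩ := h
  exact ⟨k, hk, by rw [hp]; simp⟩

-- counting a flat-mapped list of duplicate-free blocks
theorem pv_count_flat (g : String → List Int) (i : Int) (hg : ∀ w, (g w).Nodup) :
    ∀ L : List String, (L.flatMap g).count i = L.countP (fun w => decide (i ∈ g w)) := by
  intro L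
  induction L with
  | nil => simp
  | cons w L ih =>
    rw [List.flatMap_cons, List.count_append, List.countP_cons, ih]
    by_cases hm : i ∈ g w
    · rw [List.count_eq_one_of_mem (hg w) hm]; simp [hm, Nat.add_comm]
    · rw [List.count_eq_zero.mpr hm]; simp [hm]

theorem pv_hits_mem (ds : List String) (phrase : String) (i : Int)
    (h : i ∈ pvHits (pvInverted ds) phrase) : ∃ k : Nat, k < ds.length ∧ i = (k : Int) := by
  unfold pvHits at h
  rw [List.mem_flatMap] at h
  obtain ⟨w, -, hw⟩ := h
  exact pv_mem_inverted_range ds w i hw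

-- the shared-word count as a filter length over the distinct phrase words
theorem pv_shared_eq (phrase s : String) :
    PySem.Set.len (PySem.Set.inter (PySem.Set.ofList (PySem.Str.split₀ phrase))
        (PySem.Set.ofList (PySem.Str.split₀ s)))
      = (((PySem.Set.ofList (PySem.Str.split₀ phrase)).filter
           (fun w => decide (w ∈ PySem.Str.split₀ s))).length : Int) := by
  unfold PySem.Set.len PySem.Set.inter
  congr 2
  apply List.filter_congr
  intro w _
  simp [PySem.Set.contains, PySem.Set.mem_ofList]

-- hit multiplicity of an in-range index = shared-word count
theorem pv_hits_count (ds : List String) (phrase : String) (k : Nat) (hk : k < ds.length) :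
    ((pvHits (pvInverted ds) phrase).count (k : Int))
      = ((PySem.Set.ofList (PySem.Str.split₀ phrase)).filter
           (fun w => decide (w ∈ PySem.Str.split₀ ds[k]))).length := by
  unfold pvHits
  rw [pv_count_flat _ _ (pv_inverted_nodup ds), List.countP_eq_length_filter]
  congr 1
  apply List.filter_congr
  intro w _
  simp [pv_mem_inverted ds w k hk]

-- B's counts array is the hit-list fold
theorem pv_counts_eq_foldl (inv : PySem.Dict String (List Int)) (n : Int) (phrase : String) :
    pvCounts inv n phrase
      = (pvHits inv phrase).foldl
          (fun c i => PySem.List.pySetD c i (PySem.List.pyGetD c i 0 + 1))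
          (PySem.List.pyRepeat [0] n) := by
  unfold pvCounts pvHits
  rw [List.foldl_flatMap]

-- the bump fold: length preserved and each cell counts its index's occurrences
theorem pv_bump (n : Nat) (l : List Int) (hl : ∀ i ∈ l, ∃ k : Nat, k < n ∧ i = (k : Int)) :
    ∀ (init : List Int), init.length = n →
      ((l.foldl (fun c i => PySem.List.pySetD c i (PySem.List.pyGetD c i 0 + 1)) init).length = n ∧
       ∀ m : Nat, PySem.List.pyGetD
           (l.foldl (fun c i => PySem.List.pySetD c i (PySem.List.pyGetD c i 0 + 1)) init) (m : Int) 0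
         = PySem.List.pyGetD init (m : Int) 0 + (l.count (m : Int) : Int)) := by
  induction l with
  | nil => intro init hlen; exact ⟨hlen, by simp⟩
  | cons i l ih =>
    intro init hlen
    obtain ⟨k, hk, rfl⟩ := hl i (by simp)
    have hk' : k < init.length := by omega
    have hset : (PySem.List.pySetD init (k : Int) (PySem.List.pyGetD init (k : Int) 0 + 1)).length = n := by
      rw [PySem.List.length_pySetD]; exact hlen
    have hl' : ∀ i ∈ l, ∃ k : Nat, k < n ∧ i = (k : Int) := fun i hi => hl i (by simp [hi])
    obtain ⟨ihlen, ihget⟩ := ih hl' _ hset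
    refine ⟨by simpa using ihlen, ?_⟩
    intro m
    rw [List.foldl_cons, ihget m, PySem.List.pyGetD_pySetD_natCast _ _ _ _ _ (by omega),
      List.count_cons]
    by_cases hm : m = k
    · rw [if_pos hm]
      subst hm
      simp only [beq_self_eq_true, if_pos]
      push_cast
      ring
    · rw [if_neg hm]
      have : ((k : Int) == (m : Int)) = false := by
        simpa using fun h => hm (by exact_mod_cast h.symm)
      simp [this]

-- filtered index lists of two same-length enumerates with pointwise-equal predicates coincide
theorem pv_enum_filter_map {α β : Type} (P : α → Bool) (Q : β → Bool) :
    ∀ (xs : List α) (ys : List β) (s : Int), xs.length = ys.length →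
      (∀ (k : Nat) (hx : k < xs.length) (hy : k < ys.length), P xs[k] = Q ys[k]) →
      ((PySem.List.enumerate xs s).filter (fun p => P p.2)).map (fun p => p.1)
        = ((PySem.List.enumerate ys s).filter (fun p => Q p.2)).map (fun p => p.1) := by
  intro xs
  induction xs with
  | nil =>
    intro ys s hlen _
    cases ys with
    | nil => rfl
    | cons y ys => simp at hlen
  | cons x xs ih =>
    intro ys s hlen hk
    cases ys with
    | nil => simp at hlen
    | cons y ys =>
      rw [PySem.List.enumerate_cons, PySem.List.enumerate_cons, List.filter_cons, List.filter_cons]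
      have h0 : P x = Q y := by simpa using hk 0 (by simp) (by simp)
      have hrest := ih ys (s + 1) (by simpa using hlen)
        (fun k hx hy => by simpa using hk (k + 1) (by simpa using hx) (by simpa using hy))
      by_cases hp : P x = true
      · rw [if_pos (by simpa using hp), if_pos (by simp [← h0, hp]),
          List.map_cons, List.map_cons, hrest]
      · rw [if_neg (by simpa using hp), if_neg (by simp [← h0, hp]), hrest]

-- per phrase, A's matching-index list equals B's
theorem pv_key (t : Int) (ds : List String) (phrase : String) :
    (((PySem.List.enumerate ds).filter (fun p =>
        decide (t ≤ PySem.Set.len (PySem.Set.inter (PySem.Set.ofList (PySem.Str.split₀ phrase))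
          (PySem.Set.ofList (PySem.Str.split₀ p.2)))))).map (fun p => p.1))
      = ((PySem.List.enumerate (pvCounts (pvInverted ds) (PySem.List.len ds) phrase)).filter
          (fun p => decide (t ≤ p.2))).map (fun p => p.1) := by
  have hinit : (PySem.List.pyRepeat [(0 : Int)] (PySem.List.len ds)).length = ds.length := by
    rw [PySem.List.pyRepeat_singleton, List.length_replicate, PySem.List.len_eq]
    simp
  have hbump := pv_bump ds.length (pvHits (pvInverted ds) phrase)
    (pv_hits_mem ds phrase) _ hinit
  rw [← pv_counts_eq_foldl] at hbump
  obtain ⟨hclen, hcget⟩ := hbump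
  refine pv_enum_filter_map
      (fun sw => decide (t ≤ PySem.Set.len (PySem.Set.inter (PySem.Set.ofList (PySem.Str.split₀ phrase))
        (PySem.Set.ofList (PySem.Str.split₀ sw)))))
      (fun c => decide (t ≤ c)) ds _ 0 (by omega) ?_
  intro k hx hy
  have hget : (pvCounts (pvInverted ds) (PySem.List.len ds) phrase)[k]
      = PySem.List.pyGetD (pvCounts (pvInverted ds) (PySem.List.len ds) phrase) (k : Int) 0 := by
    rw [PySem.List.pyGetD_natCast]
    exact (List.getD_eq_getElem _ _ hy).symm
  have hrep : PySem.List.pyGetD (PySem.List.pyRepeat [(0 : Int)] (PySem.List.len ds)) (k : Int) 0 = 0 := by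
    rw [PySem.List.pyGetD_natCast, PySem.List.pyRepeat_singleton]
    simp [List.getD]
  have hcount : (pvCounts (pvInverted ds) (PySem.List.len ds) phrase)[k]
      = (((PySem.Set.ofList (PySem.Str.split₀ phrase)).filter
          (fun w => decide (w ∈ PySem.Str.split₀ ds[k]))).length : Int) := by
    rw [hget, hcget, hrep, zero_add, pv_hits_count ds phrase k hx]
  rw [hcount, ← pv_shared_eq]

-- ===== VERDICT (by name: the statement is the Claim_ definition above) =====
theorem find_matches_bow_spec : Claim_equal_find_matches_bow := by
  unfold Claim_equal_find_matches_bow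
  intro phrases ds t _
  unfold Spec_find_matches_bow
  simp only [find_matches_bow, find_matches_bow_alt]
  have hbody : (fun (m : PySem.Set Int) (phrase : String) =>
      (PySem.List.enumerate ds).foldl (fun m p =>
        if t ≤ PySem.Set.len (PySem.Set.inter (PySem.Set.ofList (PySem.Str.split₀ phrase))
            (PySem.Set.ofList (PySem.Str.split₀ p.2)))
        then PySem.Set.add m p.1 else m) m)
      = (fun m phrase =>
        (PySem.List.enumerate (pvCounts (pvInverted ds) (PySem.List.len ds) phrase)).foldl
          (fun m p => if t ≤ p.2 then PySem.Set.add m p.1 else m) m) := by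
    funext m phrase
    rw [pv_innerA, pv_innerB, pv_key]
  rw [hbody]
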